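-- pv_equiv track=rewrite | github.com/leaving-voider/LeetCode.cn-Record | LeetCode/面试题 17.08-circus-tower-lcci.py | bestSeqAtIndex
-- ===== SOURCE A (Python) =====
-- from typing import List
--
-- def bestSeqAtIndex(height: List[int], weight: List[int]) -> int:
--     # 最后返回的就是x需要插入longest数组的地方
--     def bisect_(nums, x):
--         l, r = 0, len(nums) - 1
--         loc = r + 1
--         while(l<=r):
--             mid = (l+r)//2
--             if nums[mid] >= x:
--                 loc = mid
--                 r = mid - 1
--             else:
--                 l = mid + 1
--         return loc
--     longest = []
--     # 先按x[0]递增排序，如果相同，则按-x[1]的递增排序，即x[1]的递减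
--     for h, w in sorted(zip(height,weight),key = lambda x:[x[0],-x[1]]):
--         loc = bisect_(longest, w)
--         longest[loc:loc+1] = [w]
--     return len(longest)
-- ===== SOURCE B (Python) =====
-- def bestSeqAtIndex(height, weight):
--     # same sort as A; then O(n^2) DP for the longest strictly increasing weight subsequence
--     pairs = sorted(zip(height, weight), key=lambda x: [x[0], -x[1]])
--     dp = []          # (weight, length of longest strictly increasing run ending here)
--     best = 0
--     for _, x in pairs:
--         m = 0
--         for w, d in dp:
--             if w < x and d > m:
--                 m = d
--         dp.append((x, m + 1))
--         if m + 1 > best: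
--             best = m + 1
--     return best
-- ===== Notes on version B (the rewrite author's own statement) =====
-- stated objective: simpler
-- what changed: Keeps A's exact sort but replaces the patience structure (hand-written binary search + slice replacement into a tails list) by a plain quadratic dynamic program over the sorted weights: dp[i] = 1 + max dp value among earlier strictly smaller weights, returning the running maximum.
import Mathlib
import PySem

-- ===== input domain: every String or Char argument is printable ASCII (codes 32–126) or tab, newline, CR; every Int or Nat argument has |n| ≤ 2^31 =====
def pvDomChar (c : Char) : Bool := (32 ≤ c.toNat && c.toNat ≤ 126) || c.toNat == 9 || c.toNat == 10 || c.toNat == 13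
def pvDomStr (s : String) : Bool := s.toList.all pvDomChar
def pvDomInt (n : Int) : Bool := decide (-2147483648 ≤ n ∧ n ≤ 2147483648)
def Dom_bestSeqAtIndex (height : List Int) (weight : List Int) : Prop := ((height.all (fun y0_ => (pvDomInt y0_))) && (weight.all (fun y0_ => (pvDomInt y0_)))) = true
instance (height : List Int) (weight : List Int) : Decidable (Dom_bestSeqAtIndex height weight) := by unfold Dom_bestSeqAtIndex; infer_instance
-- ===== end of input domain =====

-- B keeps A's sort but replaces the patience (binary-search + splice) structure by a plain
-- O(n^2) dynamic program over the sorted weights; objective: simpler.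

-- ===== PORT A =====
-- the same sort key as Python's `lambda x: [x[0], -x[1]]` (lexicographic pair compare)
def pvKey (p : Int × Int) : Lex (Int × Int) := toLex (p.1, -p.2)

-- A's inner `while l <= r` loop of bisect_.  `nums[mid]` is ported with pyGetD: on every call
-- reached from bestSeqAtIndex we have 0 ≤ l ≤ mid ≤ r < len(nums) (proved below), so the
-- Python indexing never raises and the default is never used.
def pvBisectAux (nums : List Int) (x : Int) (l r loc : Int) : Int :=
  if _h : l ≤ r then
    let mid := PySem.Int.floordiv (l + r) 2
    if PySem.List.pyGetD nums mid 0 ≥ x then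
      pvBisectAux nums x l (mid - 1) mid
    else
      pvBisectAux nums x (mid + 1) r loc
  else loc
termination_by (r + 1 - l).toNat
decreasing_by
  · have := PySem.Int.floordiv_two_mid_bounds (lo := l) (hi := r) _h
    omega
  · have := PySem.Int.floordiv_two_mid_bounds (lo := l) (hi := r) _h
    omega

def pvBisect (nums : List Int) (x : Int) : Int :=
  pvBisectAux nums x 0 (PySem.List.len nums - 1) (PySem.List.len nums)

-- `longest[loc:loc+1] = [w]`  =  longest[:loc] ++ [w] ++ longest[loc+1:]
def pvStepA (longest : List Int) (w : Int) : List Int :=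
  let loc := pvBisect longest w
  PySem.List.slice longest none (some loc) ++ [w] ++ PySem.List.slice longest (some (loc + 1)) none

def bestSeqAtIndex (height : List Int) (weight : List Int) : Int :=
  let pairs := PySem.List.sorted (height.zip weight) pvKey false
  PySem.List.len (pairs.foldl (fun longest hw => pvStepA longest hw.2) [])

-- ===== PORT B =====
-- inner loop of B: m = max dp value among already-seen weights strictly below x (0 if none)
def pvInnerMax (dp : List (Int × Int)) (x : Int) : Int :=
  dp.foldl (fun m wd => if wd.1 < x ∧ wd.2 > m then wd.2 else m) 0

def pvStepB (st : List (Int × Int) × Int) (hw : Int × Int) : List (Int × Int) × Int :=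
  let x := hw.2
  let m := pvInnerMax st.1 x
  (st.1 ++ [(x, m + 1)], if m + 1 > st.2 then m + 1 else st.2)

def bestSeqAtIndex_alt (height : List Int) (weight : List Int) : Int :=
  let pairs := PySem.List.sorted (height.zip weight) pvKey false
  (pairs.foldl pvStepB ([], 0)).2

-- ===== PRECONDITION & SPEC =====
def Spec_bestSeqAtIndex (height : List Int) (weight : List Int) (out : Int) : Prop := out = bestSeqAtIndex_alt height weight
instance (height : List Int) (weight : List Int) (out : Int) : Decidable (Spec_bestSeqAtIndex height weight out) := by unfold Spec_bestSeqAtIndex; infer_instance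

-- ===== CLAIM (what is proved, stated in full; the proofs are below) =====
def Claim_equal_bestSeqAtIndex : Prop := ∀ (height : List Int) (weight : List Int), Dom_bestSeqAtIndex height weight → Spec_bestSeqAtIndex height weight (bestSeqAtIndex height weight)

-- ===== LEMMAS AND PROOFS =====

-- the coupling invariant between A's tails list T and B's state (dp, best):
-- best = |T|; T is strictly increasing; T[j] is attained by some dp entry of value T[j] and
-- dp-length ≥ j+1; and every dp entry of length ≥ j+1 has weight ≥ T[j] (T[j] is minimal).
def pvInv (T : List Int) (dp : List (Int × Int)) (best : Int) : Prop :=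
  best = (T.length : Int) ∧
  T.Pairwise (· < ·) ∧
  (∀ j : Nat, ∀ _hj : j < T.length, ∃ wd ∈ dp, wd.1 = T[j] ∧ (j : Int) + 1 ≤ wd.2) ∧
  (∀ wd ∈ dp, 1 ≤ wd.2 ∧ wd.2 ≤ (T.length : Int) ∧
     ∀ j : Nat, ∀ _hj : j < T.length, (j : Int) + 1 ≤ wd.2 → T[j] ≤ wd.1)

-- in a strictly increasing list, the elements < x are exactly the first countP(·<x) ones
lemma pv_count_char (T : List Int) (x : Int) (hp : T.Pairwise (· < ·)) :
    ∀ j : Nat, ∀ _hj : j < T.length, (T[j] < x ↔ j < T.countP (fun t => t < x)) := by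
  induction T with
  | nil => intro j hj; simp at hj
  | cons a t ih =>
    rcases List.pairwise_cons.mp hp with ⟨ha, hpt⟩
    intro j hj
    by_cases hax : a < x
    · have hc : (a :: t).countP (fun t => t < x) = t.countP (fun t => t < x) + 1 := by
        simp [hax]
      cases j with
      | zero => simpa [hc] using hax
      | succ k =>
        simp only [List.getElem_cons_succ, hc]
        have hk : k < t.length := by simpa using hj
        rw [ih hpt k hk]
        omega
    · have hct : t.countP (fun t => t < x) = 0 := by
        rw [List.countP_eq_zero]
        intro b hb
        have := ha b hb
        simp only [decide_eq_true_eq]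
        omega
      have hc : (a :: t).countP (fun t => t < x) = 0 := by
        simp [hax, hct]
      rw [hc]
      cases j with
      | zero => simpa using hax
      | succ k =>
        have hk : k < t.length := by simpa using hj
        simp only [List.getElem_cons_succ]
        constructor
        · intro hlt
          exact absurd hlt (by have := ha _ (List.getElem_mem hk); omega)
        · omega

-- the ported binary-search loop computes countP(· < x) on a strictly increasing list
lemma pvBisectAux_eq (T : List Int) (x : Int) (hp : T.Pairwise (· < ·)) :
    ∀ l r loc : Int, 0 ≤ l → r < (T.length : Int) →
      l ≤ (T.countP (fun t => t < x) : Int) →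
      (T.countP (fun t => t < x) : Int) ≤ loc → loc ≤ r + 1 →
      pvBisectAux T x l r loc = (T.countP (fun t => t < x) : Int) := by
  intro l r loc
  induction hn : (r + 1 - l).toNat using Nat.strong_induction_on generalizing l r loc with
  | _ n ih =>
    intro h0 hr hl hloc hlocr
    rw [pvBisectAux]
    by_cases hlr : l ≤ r
    · rw [dif_pos hlr]
      have hmb := PySem.Int.floordiv_two_mid_bounds (lo := l) (hi := r) hlr
      simp only [ge_iff_le]
      set mid := PySem.Int.floordiv (l + r) 2 with hmid
      have hmid0 : 0 ≤ mid := by omega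
      have hmidlen : mid < (T.length : Int) := by omega
      rw [PySem.List.pyGetD_eq_getElem T 0 hmid0 (by simpa using hmidlen)]
      have hmt : mid.toNat < T.length := by omega
      have hchar := pv_count_char T x hp mid.toNat hmt
      by_cases hge : x ≤ T[mid.toNat]
      · rw [if_pos hge]
        have hcm : (T.countP (fun t => t < x) : Int) ≤ mid := by
          have : ¬ T[mid.toNat] < x := by omega
          have := (not_congr hchar).mp this
          omega
        exact ih ((mid - 1) + 1 - l).toNat (by omega) l (mid - 1) mid (by omega)
          h0 (by omega) hl hcm (by omega)
      · rw [if_neg hge]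
        have hlm : mid + 1 ≤ (T.countP (fun t => t < x) : Int) := by
          have : T[mid.toNat] < x := by omega
          have := hchar.mp this
          omega
        exact ih (r + 1 - (mid + 1)).toNat (by omega) (mid + 1) r loc (by omega)
          (by omega) hr hlm hloc hlocr
    · rw [dif_neg hlr]
      omega

lemma pvBisect_eq (T : List Int) (x : Int) (hp : T.Pairwise (· < ·)) :
    pvBisect T x = (T.countP (fun t => t < x) : Int) := by
  have hc := List.countP_le_length (l := T) (p := fun t => t < x)
  unfold pvBisect
  rw [PySem.List.len_eq]
  exact pvBisectAux_eq T x hp 0 ((T.length : Int) - 1) (T.length : Int) le_rfl (by omega)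
    (by omega) (by exact_mod_cast hc) (by omega)

-- characterisation of B's inner fold
lemma pvInnerMax_ge_init (dp : List (Int × Int)) (x a : Int) :
    a ≤ dp.foldl (fun m wd => if wd.1 < x ∧ wd.2 > m then wd.2 else m) a := by
  induction dp generalizing a with
  | nil => simp
  | cons wd t ih =>
    simp only [List.foldl_cons]
    split_ifs with h
    · exact le_trans (by omega) (ih wd.2)
    · exact ih a

lemma pvInnerMax_ge_mem (dp : List (Int × Int)) (x a : Int) :
    ∀ wd ∈ dp, wd.1 < x →
      wd.2 ≤ dp.foldl (fun m wd => if wd.1 < x ∧ wd.2 > m then wd.2 else m) a := by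
  induction dp generalizing a with
  | nil => simp
  | cons hd t ih =>
    intro wd hwd hlt
    simp only [List.foldl_cons]
    rcases List.mem_cons.mp hwd with rfl | hmem
    · split_ifs with h
      · exact pvInnerMax_ge_init t x wd.2
      · have : wd.2 ≤ a := by omega
        exact le_trans this (pvInnerMax_ge_init t x a)
    · exact ih _ wd hmem hlt

lemma pvInnerMax_attained (dp : List (Int × Int)) (x a : Int) :
    dp.foldl (fun m wd => if wd.1 < x ∧ wd.2 > m then wd.2 else m) a = a ∨
      ∃ wd ∈ dp, wd.1 < x ∧
        dp.foldl (fun m wd => if wd.1 < x ∧ wd.2 > m then wd.2 else m) a = wd.2 := by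
  induction dp generalizing a with
  | nil => simp
  | cons hd t ih =>
    simp only [List.foldl_cons]
    split_ifs with h
    · rcases ih hd.2 with heq | ⟨wd, hm, hl, he⟩
      · exact Or.inr ⟨hd, by simp, h.1, heq⟩
      · exact Or.inr ⟨wd, by simp [hm], hl, he⟩
    · rcases ih a with heq | ⟨wd, hm, hl, he⟩
      · exact Or.inl heq
      · exact Or.inr ⟨wd, by simp [hm], hl, he⟩

-- B's m equals A's insertion point
lemma pvInnerMax_eq_count (T : List Int) (dp : List (Int × Int)) (best x : Int)
    (h : pvInv T dp best) :
    pvInnerMax dp x = (T.countP (fun t => t < x) : Int) := by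
  obtain ⟨hbest, hp, hatt, hmin⟩ := h
  have hcle : T.countP (fun t => t < x) ≤ T.length := List.countP_le_length
  unfold pvInnerMax
  set m := dp.foldl (fun m wd => if wd.1 < x ∧ wd.2 > m then wd.2 else m) 0 with hmdef
  have hm0 : (0 : Int) ≤ m := pvInnerMax_ge_init dp x 0
  have hmc : m ≤ (T.countP (fun t => t < x) : Int) := by
    rcases pvInnerMax_attained dp x 0 with heq | ⟨wd, hmem, hlt, he⟩
    · rw [← hmdef] at heq; omega
    · rw [← hmdef] at he
      obtain ⟨h1, h2, hminj⟩ := hmin wd hmem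
      have hj : (wd.2 - 1).toNat < T.length := by omega
      have hle := hminj (wd.2 - 1).toNat hj (by omega)
      have hch := (pv_count_char T x hp _ hj).mp (by omega)
      omega
  have hcm : (T.countP (fun t => t < x) : Int) ≤ m := by
    by_cases hc0 : T.countP (fun t => t < x) = 0
    · omega
    · have hj : T.countP (fun t => t < x) - 1 < T.length := by omega
      have hTj : T[T.countP (fun t => t < x) - 1] < x :=
        (pv_count_char T x hp _ hj).mpr (by omega)
      obtain ⟨wd, hmem, hval, hlen⟩ := hatt _ hj
      have := pvInnerMax_ge_mem dp x 0 wd hmem (by rw [hval]; exact hTj)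
      rw [← hmdef] at this
      omega
  omega

-- the one-element step preserves the invariant
lemma pvStep_inv (T : List Int) (dp : List (Int × Int)) (best : Int) (hw : Int × Int)
    (h : pvInv T dp best) :
    pvInv (pvStepA T hw.2) (pvStepB (dp, best) hw).1 (pvStepB (dp, best) hw).2 := by
  obtain ⟨hbest, hp, hatt, hmin⟩ := h
  set x := hw.2 with hx
  set c := T.countP (fun t => t < x) with hcdef
  have hcle : c ≤ T.length := List.countP_le_length
  have hm : pvInnerMax dp x = (c : Int) := pvInnerMax_eq_count T dp best x ⟨hbest, hp, hatt, hmin⟩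
  have hloc : pvBisect T x = (c : Int) := pvBisect_eq T x hp
  have hchar := pv_count_char T x hp
  have hTnew : pvStepA T x = T.take c ++ x :: T.drop (c + 1) := by
    simp only [pvStepA]
    rw [hloc, PySem.List.slice_to_natCast]
    have hcast : ((c : Int) + 1) = ((c + 1 : Nat) : Int) := by push_cast; ring
    rw [hcast, PySem.List.slice_from_natCast]
    simp
  simp only [pvStepB]
  rw [hm, hTnew]
  by_cases hcl : c < T.length
  · -- replacement case: the new tails list is T.set c x and best is unchanged
    have hset : T.set c x = T.take c ++ x :: T.drop (c + 1) := by
      rw [List.set_eq_take_append_cons_drop, if_pos hcl]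
    rw [← hset]
    have hlen : (T.set c x).length = T.length := List.length_set ..
    have hxc : x ≤ T[c] := by
      have := hchar c hcl
      omega
    have hjlt : ∀ j, ∀ _hj : j < T.length, j < c → T[j] < x := by
      intro j hj hjc
      exact (hchar j hj).mpr hjc
    have hcond : ¬ ((c : Int) + 1 > best) := by omega
    rw [if_neg hcond]
    refine ⟨by rw [hlen]; exact hbest, ?_, ?_, ?_⟩
    · -- pairwise
      rw [List.pairwise_iff_getElem] at hp ⊢
      intro i j hi hj hij
      rw [hlen] at hi hj
      rw [List.getElem_set, List.getElem_set]
      split_ifs with hci hcj hcj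
      · omega
      · exact lt_of_le_of_lt hxc (hp c j hcl hj (by omega))
      · exact hjlt i hi (by omega)
      · exact hp i j hi hj hij
    · -- attainment
      intro j hj
      rw [hlen] at hj
      by_cases hjc : j = c
      · refine ⟨(x, (c : Int) + 1), by simp [hx], ?_, ?_⟩
        · rw [List.getElem_set, if_pos hjc.symm]
        · subst hjc; omega
      · obtain ⟨wd, hmem, hval, hl2⟩ := hatt j hj
        refine ⟨wd, by simp [hmem], ?_, hl2⟩
        rw [List.getElem_set, if_neg (by omega)]
        exact hval
    · -- minimality
      intro wd hmem
      rcases List.mem_append.mp hmem with hold | hnew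
      · obtain ⟨h1, h2, h3⟩ := hmin wd hold
        refine ⟨h1, by rw [hlen]; exact h2, ?_⟩
        intro j hj hle
        rw [hlen] at hj
        rw [List.getElem_set]
        split_ifs with hcj
        · by_contra hlt
          have hwle : wd.2 ≤ pvInnerMax dp x :=
            pvInnerMax_ge_mem dp x 0 wd hold (by omega)
          rw [hm] at hwle
          omega
        · exact h3 j hj hle
      · have hwd : wd = (x, (c : Int) + 1) := by simpa using hnew
        subst hwd
        refine ⟨by omega, by rw [hlen]; omega, ?_⟩
        intro j hj hle
        rw [hlen] at hj
        rw [List.getElem_set]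
        split_ifs with hcj
        · exact le_refl x
        · exact le_of_lt (hjlt j hj (by omega))
  · -- append case: c = T.length, the new tails list is T ++ [x] and best grows by one
    have hceq : c = T.length := by omega
    have happ : T.take c ++ x :: T.drop (c + 1) = T ++ [x] := by
      rw [hceq]
      simp [List.drop_eq_nil_of_le]
    rw [happ]
    have hallt : ∀ j, ∀ _hj : j < T.length, T[j] < x := by
      intro j hj
      exact (hchar j hj).mpr (by omega)
    have hcond : ((c : Int) + 1 > best) := by omega
    rw [if_pos hcond]
    refine ⟨by simp; omega, ?_, ?_, ?_⟩
    · -- pairwise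
      refine List.pairwise_append.mpr ⟨hp, by simp, ?_⟩
      intro a ha b hb
      rw [List.mem_singleton] at hb
      subst hb
      obtain ⟨j, hj, rfl⟩ := List.mem_iff_getElem.mp ha
      exact hallt j hj
    · -- attainment
      intro j hj
      simp only [List.length_append, List.length_cons, List.length_nil] at hj
      by_cases hjl : j < T.length
      · obtain ⟨wd, hmem, hval, hl2⟩ := hatt j hjl
        refine ⟨wd, by simp [hmem], ?_, hl2⟩
        rw [List.getElem_append_left hjl]
        exact hval
      · have hje : j = T.length := by omega
        refine ⟨(x, (c : Int) + 1), by simp [hx], ?_, ?_⟩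
        · subst hje; simp
        · omega
    · -- minimality
      intro wd hmem
      rcases List.mem_append.mp hmem with hold | hnew
      · obtain ⟨h1, h2, h3⟩ := hmin wd hold
        refine ⟨h1, by simp; omega, ?_⟩
        intro j hj hle
        have hjl : j < T.length := by omega
        rw [List.getElem_append_left hjl]
        exact h3 j hjl hle
      · have hwd : wd = (x, (c : Int) + 1) := by simpa using hnew
        subst hwd
        refine ⟨by omega, by simp; omega, ?_⟩
        intro j hj hle
        simp only [List.length_append, List.length_cons, List.length_nil] at hj
        by_cases hjl : j < T.length
        · rw [List.getElem_append_left hjl]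
          exact le_of_lt (hallt j hjl)
        · have hje : j = T.length := by omega
          subst hje
          simp

lemma pvFold_eq (ps : List (Int × Int)) :
    ∀ (T : List Int) (dp : List (Int × Int)) (best : Int), pvInv T dp best →
      ((ps.foldl (fun longest hw => pvStepA longest hw.2) T).length : Int) =
        (ps.foldl pvStepB (dp, best)).2 := by
  induction ps with
  | nil =>
    intro T dp best h
    exact h.1.symm
  | cons hw t ih =>
    intro T dp best h
    simp only [List.foldl_cons]
    exact ih _ _ _ (pvStep_inv T dp best hw h)

-- ===== VERDICT (by name: the statement is the Claim_ definition above) =====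
theorem bestSeqAtIndex_spec : Claim_equal_bestSeqAtIndex := by
  intro height weight _
  unfold Spec_bestSeqAtIndex bestSeqAtIndex bestSeqAtIndex_alt
  simp only [PySem.List.len_eq]
  exact pvFold_eq _ [] [] 0 ⟨rfl, by simp, by simp, by simp⟩
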